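-- pv_equiv track=rewrite | github.com/xytlktlkbl/CS61A | hw02/test.py | count_until_larger
-- ===== SOURCE A (Python) =====
-- def count_until_larger(num):
--     """
--     Complete the function count_until_larger that takes in a positive integer num.
--     count_until_larger examines the rightmost digit and counts digits from right to
--     left until it encounters a digit larger than the rightmost digit, then returns that count.
--
--     >>> count_until_larger(117) # .Case 1
--     -1
--     >>> count_until_larger(8117) # .Case 2
--     3
--     >>> count_until_larger(9118117) # .Case 3
--     3
--     >>> count_until_larger(8777)  # .Case 4
--     3
--     >>> count_until_larger(22) # .Case 5
--     -1
--     >>> count_until_larger(0) # .Case 6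
--     -1
--     """
--     "*** YOUR CODE HERE ***"
--     k = num % 10
--     count = 1
--     num = num // 10
--     while num != 0:
--         if num % 10 <= k:
--             count += 1
--         if num % 10 > k:
--             return count
--         num = num // 10
--     return -1
-- ===== SOURCE B (Python) =====
-- def count_until_larger(num):
--     digits = [num % 10]
--     n = num // 10
--     while n > 0:
--         digits.append(n % 10)
--         n //= 10
--     k = digits[0]
--     for i in range(1, len(digits)):
--         if digits[i] > k:
--             return i
--     return -1
-- ===== Notes on version B (the rewrite author's own statement) =====
-- stated objective: simpler
-- what changed: B builds the digit list once and returns the index (distance from the rightmost digit) of the first digit exceeding it, instead of A's single while loop threading a running count accumulator through repeated mod-and-floordiv steps.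
-- outside the precondition, e.g. on count_until_larger(-5): A returns 1, B returns -1; on count_until_larger(-1): A does not finish within the time limit, B returns -1
import Mathlib
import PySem

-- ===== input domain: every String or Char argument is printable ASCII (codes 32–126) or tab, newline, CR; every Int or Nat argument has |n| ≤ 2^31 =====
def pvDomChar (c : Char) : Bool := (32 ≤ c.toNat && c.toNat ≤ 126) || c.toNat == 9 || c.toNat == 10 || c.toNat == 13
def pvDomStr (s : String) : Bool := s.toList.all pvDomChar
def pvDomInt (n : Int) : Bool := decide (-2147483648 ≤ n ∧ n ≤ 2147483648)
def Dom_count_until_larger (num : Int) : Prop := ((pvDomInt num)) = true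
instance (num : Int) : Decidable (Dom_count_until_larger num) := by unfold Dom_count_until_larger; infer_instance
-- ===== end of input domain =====

-- B replaces A's running-count while loop by building the digit list once and returning
-- the first index (distance from the rightmost digit) whose digit exceeds it (simpler; same cost).

-- ===== PORT A =====
-- A's while loop; fuel only makes the recursion total (for num ≥ 0 the fuel num.natAbs + 1
-- always suffices, so the 0-fuel branch is never reached inside Pre_).
def cuLoopA (k : Int) : Nat → Int → Int → Int
  | 0, _, _ => -1
  | fuel + 1, num, count =>
    if num = 0 then -1
    else
      let count := if PySem.Int.mod num 10 ≤ k then count + 1 else count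
      if PySem.Int.mod num 10 > k then count
      else cuLoopA k fuel (PySem.Int.floordiv num 10) count

def count_until_larger (num : Int) : Int :=
  cuLoopA (PySem.Int.mod num 10) (num.natAbs + 1) (PySem.Int.floordiv num 10) 1

-- ===== PORT B =====
-- B's `while n > 0` digit-building loop; fuel only makes the recursion total.
def cuBuild : Nat → Int → List Int → List Int
  | 0, _, acc => acc
  | fuel + 1, n, acc =>
    if n > 0 then cuBuild fuel (PySem.Int.floordiv n 10) (acc ++ [PySem.Int.mod n 10])
    else acc

-- B's `for i in range(1, len(digits))` scan with early return.
def cuScan (digits : List Int) (k : Int) : List Int → Int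
  | [] => -1
  | i :: rest => if PySem.List.pyGetD digits i 0 > k then i else cuScan digits k rest

def count_until_larger_alt (num : Int) : Int :=
  let digits := cuBuild (num.natAbs + 1) (PySem.Int.floordiv num 10) [PySem.Int.mod num 10]
  cuScan digits (PySem.List.pyGetD digits 0 0)
    (PySem.List.pyRange 1 (digits.length : Int) 1)

-- ===== PRECONDITION & SPEC =====
-- Pre_ excludes negative num (outside the documented "positive integer" domain): there A's loop
-- either diverges (when Python's floor-mod makes the rightmost digit nine) or returns a count from
-- walking the negative floordiv sequence toward minus one, while B naturally returns -1.
def Pre_count_until_larger (num : Int) : Prop := 0 ≤ num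
instance (num : Int) : Decidable (Pre_count_until_larger num) := by
  unfold Pre_count_until_larger; infer_instance

def pvWitness_count_until_larger : Int := 8117

def Spec_count_until_larger (num : Int) (out : Int) : Prop := out = count_until_larger_alt num
instance (num : Int) (out : Int) : Decidable (Spec_count_until_larger num out) := by
  unfold Spec_count_until_larger; infer_instance

-- ===== CLAIM (what is proved, stated in full; the proofs are below) =====
def Claim_equal_count_until_larger : Prop := ∀ (num : Int), Dom_count_until_larger num → Pre_count_until_larger num → Spec_count_until_larger num (count_until_larger num)

-- ===== LEMMAS AND PROOFS =====

-- digits of n, least significant first ([] for n ≤ 0): the common reference list.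
def cuDigits (n : Int) : List Int :=
  if h : 0 < n then PySem.Int.mod n 10 :: cuDigits (PySem.Int.floordiv n 10) else []
termination_by n.toNat
decreasing_by
  rw [PySem.Int.floordiv_eq_ediv_of_pos (by norm_num)]
  omega

-- common spec: first index (counting from c) of a digit > k, else -1
def cuSpec (k : Int) : List Int → Int → Int
  | [], _ => -1
  | d :: rest, c => if d > k then c else cuSpec k rest (c + 1)

theorem cuLoopA_eq (k : Int) : ∀ (fuel : Nat) (n c : Int), 0 ≤ n → n.toNat < fuel →
    cuLoopA k fuel n c = cuSpec k (cuDigits n) c := by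
  intro fuel
  induction fuel with
  | zero => intro n c _ h; omega
  | succ f ih =>
    intro n c hn hf
    by_cases h0 : n = 0
    · subst h0; simp [cuLoopA, cuDigits, cuSpec]
    · have hpos : 0 < n := by omega
      rw [cuLoopA, cuDigits, dif_pos hpos,
        PySem.Int.mod_eq_emod_of_pos (by norm_num), PySem.Int.floordiv_eq_ediv_of_pos (by norm_num)]
      have hle : n / 10 < n := by omega
      by_cases hgt : n % 10 > k
      · simp [cuSpec, h0, hgt, show ¬ n % 10 ≤ k by omega]
      · simp only [cuSpec, if_neg h0, if_neg hgt, if_pos (show n % 10 ≤ k by omega)]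
        exact ih (n / 10) (c + 1) (by omega) (by omega)

theorem cuBuild_eq : ∀ (fuel : Nat) (n : Int) (acc : List Int), 0 ≤ n → n.toNat < fuel →
    cuBuild fuel n acc = acc ++ cuDigits n := by
  intro fuel
  induction fuel with
  | zero => intro n acc _ h; omega
  | succ f ih =>
    intro n acc hn hf
    by_cases hpos : 0 < n
    · rw [cuBuild, if_pos hpos, cuDigits, dif_pos hpos,
        PySem.Int.floordiv_eq_ediv_of_pos (by norm_num)]
      rw [ih (n / 10) _ (by omega) (by omega)]
      simp
    · rw [cuBuild, if_neg hpos, cuDigits, dif_neg hpos]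
      simp

theorem cuScan_eq (k : Int) (full : List Int) : ∀ (j : Nat),
    cuScan full k (PySem.List.pyRange (j : Int) (full.length : Int) 1)
      = cuSpec k (full.drop j) (j : Int) := by
  intro j
  induction hm : full.length - j generalizing j with
  | zero =>
    have hge : full.length ≤ j := by omega
    have hnil : PySem.List.pyRange (j : Int) (full.length : Int) 1 = [] := by
      simp [PySem.List.pyRange]; omega
    rw [hnil, List.drop_eq_nil_of_le hge]
    simp [cuScan, cuSpec]
  | succ m ih =>
    have hlt : j < full.length := by omega
    rw [PySem.List.pyRange_one_cons (by exact_mod_cast hlt), cuScan,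
      List.drop_eq_getElem_cons hlt, cuSpec,
      PySem.List.pyGetD_eq_getElem full 0 (by positivity) (by exact_mod_cast hlt)]
    by_cases hgt : full[j] > k
    · rw [if_pos hgt, if_pos (by simpa using hgt)]
    · rw [if_neg hgt, if_neg (by simpa using hgt)]
      have := ih (j + 1) (by omega)
      push_cast at this ⊢
      rw [this]

theorem count_until_larger_spec : Claim_equal_count_until_larger := by
  intro num _ hpre
  have hpre' : (0:Int) ≤ num := hpre
  unfold Spec_count_until_larger count_until_larger count_until_larger_alt
  have hq0 : 0 ≤ PySem.Int.floordiv num 10 := by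
    rw [PySem.Int.floordiv_eq_ediv_of_pos (by norm_num)]; omega
  have hqf : (PySem.Int.floordiv num 10).toNat < num.natAbs + 1 := by
    rw [PySem.Int.floordiv_eq_ediv_of_pos (by norm_num)]; omega
  rw [cuLoopA_eq _ _ _ _ hq0 hqf, cuBuild_eq _ _ _ hq0 hqf]
  show cuSpec _ _ 1 = cuScan ([PySem.Int.mod num 10] ++ cuDigits (PySem.Int.floordiv num 10))
      (PySem.List.pyGetD ([PySem.Int.mod num 10] ++ cuDigits (PySem.Int.floordiv num 10)) 0 0)
      (PySem.List.pyRange 1 (([PySem.Int.mod num 10] ++ cuDigits (PySem.Int.floordiv num 10)).length : Int))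
  have h0 : PySem.List.pyGetD
      ([PySem.Int.mod num 10] ++ cuDigits (PySem.Int.floordiv num 10)) 0 0
      = PySem.Int.mod num 10 := by
    rw [PySem.List.pyGetD_eq_getElem _ 0 (by norm_num) (by simp)]
    simp
  rw [h0]
  have hsc := cuScan_eq (PySem.Int.mod num 10)
    ([PySem.Int.mod num 10] ++ cuDigits (PySem.Int.floordiv num 10)) 1
  push_cast at hsc
  rw [hsc]
  simp
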